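-- pv_equiv track=rewrite | github.com/terrene-foundation/mlfp | scripts/generate_selfcontained_notebook.py | strip_copyright_header
-- ===== SOURCE A (Python) =====
-- def strip_copyright_header(source: str) -> str:
--     """Remove the `# Copyright ... / # SPDX-License-Identifier: ...` prefix."""
--     lines = source.split("\n")
--     i = 0
--     while i < len(lines) and (
--         lines[i].startswith("# Copyright") or lines[i].startswith("# SPDX")
--     ):
--         i += 1
--     return "\n".join(lines[i:])
-- ===== SOURCE B (Python) =====
-- def strip_copyright_header(source: str) -> str:
--     """Remove the `# Copyright ... / # SPDX-License-Identifier: ...` prefix."""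
--     while source.startswith("# Copyright") or source.startswith("# SPDX"):
--         _head, sep, source = source.partition("\n")
--         if not sep:
--             return ""
--     return source
-- ===== Notes on version B (the rewrite author's own statement) =====
-- stated objective: simpler
-- what changed: B strips the header with one forward pass over the string itself (startswith + partition at the first newline, looping on the remainder) instead of splitting the entire source into a list of lines, scanning an index over it and re-joining the suffix.
import Mathlib
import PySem

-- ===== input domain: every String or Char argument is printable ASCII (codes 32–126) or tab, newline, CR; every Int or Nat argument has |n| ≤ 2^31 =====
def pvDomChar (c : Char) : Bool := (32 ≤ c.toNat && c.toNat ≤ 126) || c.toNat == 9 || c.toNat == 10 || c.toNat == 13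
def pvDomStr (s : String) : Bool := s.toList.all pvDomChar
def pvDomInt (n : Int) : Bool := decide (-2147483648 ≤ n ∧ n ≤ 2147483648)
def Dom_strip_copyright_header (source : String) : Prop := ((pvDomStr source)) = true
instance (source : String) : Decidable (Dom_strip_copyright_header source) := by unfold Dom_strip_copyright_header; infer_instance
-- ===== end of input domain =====

-- B strips header lines in one forward pass over the string (startswith + partition on the
-- first newline) instead of splitting the whole source into lines and re-joining; objective: simpler/alternative.

def pvHdr1 : List Char := "# Copyright".toList
def pvHdr2 : List Char := "# SPDX".toList

-- ===== PORT A =====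
-- the 'while i < len(lines) and lines[i].startswith(...)' index loop, as dropping from the line list
def pvADrop : List (List Char) → List (List Char)
  | [] => []
  | l :: ls =>
      if PySem.Chars.startswith l pvHdr1 || PySem.Chars.startswith l pvHdr2 then pvADrop ls
      else l :: ls

def strip_copyright_header (source : String) : String :=
  String.ofList (PySem.Chars.join ['\n'] (pvADrop (PySem.Chars.splitOn source.toList ['\n'])))

-- ===== PORT B =====
-- hand port of str.partition("\n") (PySem has no partition): (before, found?, after), exact
def pvPartitionNl : List Char → List Char × Bool × List Char
  | [] => ([], false, [])
  | c :: t =>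
      if c = '\n' then ([], true, t)
      else
        let p := pvPartitionNl t
        (c :: p.1, p.2.1, p.2.2)

-- termination fact for pvBGo (cited by its decreasing_by)
theorem pvPartitionNl_lt (cs : List Char) (h : (pvPartitionNl cs).2.1 = true) :
    (pvPartitionNl cs).2.2.length < cs.length := by
  induction cs with
  | nil => simp [pvPartitionNl] at h
  | cons c t ih =>
    by_cases hc : c = '\n'
    · simp [pvPartitionNl, hc]
    · simp [pvPartitionNl, hc] at h ⊢
      exact (ih h).le

-- B's while loop: test the header prefixes, partition off the first line, continue on the rest
def pvBGo (cs : List Char) : List Char :=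
  if PySem.Chars.startswith cs pvHdr1 || PySem.Chars.startswith cs pvHdr2 then
    let p := pvPartitionNl cs
    if h : p.2.1 then pvBGo p.2.2 else []
  else cs
termination_by cs.length
decreasing_by exact pvPartitionNl_lt cs (by simpa using h)

def strip_copyright_header_alt (source : String) : String :=
  String.ofList (pvBGo source.toList)

-- ===== PRECONDITION & SPEC =====
def Spec_strip_copyright_header (source : String) (out : String) : Prop := out = strip_copyright_header_alt source
instance (source : String) (out : String) : Decidable (Spec_strip_copyright_header source out) := by unfold Spec_strip_copyright_header; infer_instance

-- ===== CLAIM (what is proved, stated in full; the proofs are below) =====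
def Claim_equal_strip_copyright_header : Prop := ∀ (source : String), Dom_strip_copyright_header source → Spec_strip_copyright_header source (strip_copyright_header source)

-- ===== LEMMAS AND PROOFS =====

theorem pvBGo_eq (cs : List Char) :
    pvBGo cs =
      if PySem.Chars.startswith cs pvHdr1 || PySem.Chars.startswith cs pvHdr2 then
        (if (pvPartitionNl cs).2.1 then pvBGo (pvPartitionNl cs).2.2 else [])
      else cs := by
  rw [pvBGo]; split <;> [skip; rfl]
  split <;> simp_all

-- the chunk list pvChunks cs is what source.split("\n") produces, phrased through pvPartitionNl
def pvChunks (cs : List Char) : List (List Char) :=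
  (pvPartitionNl cs).1 ::
    (if h : (pvPartitionNl cs).2.1 then pvChunks (pvPartitionNl cs).2.2 else [])
termination_by cs.length
decreasing_by exact pvPartitionNl_lt cs (by simpa using h)

theorem pvChunks_eq (cs : List Char) :
    pvChunks cs =
      (pvPartitionNl cs).1 ::
        (if (pvPartitionNl cs).2.1 then pvChunks (pvPartitionNl cs).2.2 else []) := by
  rw [pvChunks]; split <;> simp_all

theorem pvGo_nl (fuel : Nat) : ∀ (l cur : List Char) (acc : List (List Char)), l.length < fuel →
    PySem.Chars.splitOn.go ['\n'] fuel l cur acc =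
      acc.reverse ++ List.modifyHead (cur.reverse ++ ·) (pvChunks l) := by
  induction fuel with
  | zero => intro l cur acc h; omega
  | succ f ih =>
    intro l cur acc h
    cases l with
    | nil =>
      rw [pvChunks_eq]
      simp [PySem.Chars.splitOn.go, pvPartitionNl]
    | cons c t =>
      rw [pvChunks_eq]
      by_cases hc : c = '\n'
      · subst hc
        have ht : t.length < f := by simp at h; omega
        rw [PySem.Chars.splitOn.go]
        simp only [List.isPrefixOf, if_true, List.length_singleton, List.drop_succ_cons,
          List.drop_zero, pvPartitionNl]
        rw [ih t [] _ ht, pvChunks_eq]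
        simp
      · have ht : t.length < f := by simp at h; omega
        rw [PySem.Chars.splitOn.go]
        rw [if_neg (by simp [List.isPrefixOf, beq_iff_eq]; intro hh; exact hc hh.symm)]
        rw [ih t (c :: cur) acc ht, pvChunks_eq]
        simp [pvPartitionNl, hc]

theorem pvSplitOn_eq_chunks (cs : List Char) :
    PySem.Chars.splitOn cs ['\n'] = pvChunks cs := by
  rw [PySem.Chars.splitOn, pvGo_nl (cs.length + 1) cs [] [] (by omega)]
  rw [pvChunks_eq]
  simp

theorem pvPart_decomp (cs : List Char) :
    cs = (pvPartitionNl cs).1 ++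
      (if (pvPartitionNl cs).2.1 then '\n' :: (pvPartitionNl cs).2.2 else []) := by
  induction cs with
  | nil => simp [pvPartitionNl]
  | cons c t ih =>
    by_cases hc : c = '\n'
    · simp [pvPartitionNl, hc]
    · simp only [pvPartitionNl, hc, if_false, List.cons_append]
      exact congrArg (c :: ·) ih

theorem pvJoin_chunks (cs : List Char) :
    PySem.Chars.join ['\n'] (pvChunks cs) = cs := by
  induction cs using pvChunks.induct with
  | case1 cs ih =>
    rw [pvChunks_eq]
    by_cases h : (pvPartitionNl cs).2.1
    · rw [if_pos h, pvChunks_eq, PySem.Chars.join_cons_cons, ← pvChunks_eq, ih h]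
      conv_rhs => rw [pvPart_decomp cs]
      simp [h]
    · rw [if_neg h, PySem.Chars.join_singleton]
      conv_rhs => rw [pvPart_decomp cs]
      simp [h]

theorem pvPrefix_part (hdr : List Char) (hnl : '\n' ∉ hdr) : ∀ cs : List Char,
    hdr.isPrefixOf (pvPartitionNl cs).1 = hdr.isPrefixOf cs := by
  induction hdr with
  | nil => intro cs; simp [List.isPrefixOf]
  | cons a hs ih =>
    intro cs
    have ha : a ≠ '\n' := fun hh => hnl (hh ▸ List.mem_cons_self)
    have hhs : '\n' ∉ hs := fun hh => hnl (List.mem_cons_of_mem _ hh)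
    cases cs with
    | nil => simp [pvPartitionNl]
    | cons c t =>
      by_cases hc : c = '\n'
      · subst hc
        simp [pvPartitionNl, List.isPrefixOf, beq_iff_eq, ha]
      · simp only [pvPartitionNl, hc, if_false, List.isPrefixOf]
        rw [ih hhs t]

theorem pvStartswith_part (cs : List Char) (hdr : List Char) (hnl : '\n' ∉ hdr) :
    PySem.Chars.startswith (pvPartitionNl cs).1 hdr = PySem.Chars.startswith cs hdr := by
  simp only [PySem.Chars.startswith]
  exact pvPrefix_part hdr hnl cs

theorem pvMain (cs : List Char) :
    PySem.Chars.join ['\n'] (pvADrop (pvChunks cs)) = pvBGo cs := by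
  induction cs using pvBGo.induct with
  | case1 cs hcond p h ih =>
    rw [pvChunks_eq, pvBGo_eq, if_pos hcond, if_pos h]
    rw [pvADrop, if_pos ?_, ← ih]
    · rw [if_pos h]
    · rwa [pvStartswith_part cs pvHdr1 (by decide), pvStartswith_part cs pvHdr2 (by decide)]
  | case2 cs hcond p h =>
    rw [pvChunks_eq, pvBGo_eq, if_pos hcond, if_neg h]
    rw [pvADrop, if_pos ?_, if_neg h, pvADrop, PySem.Chars.join_nil]
    rwa [pvStartswith_part cs pvHdr1 (by decide), pvStartswith_part cs pvHdr2 (by decide)]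
  | case3 cs hcond =>
    rw [pvBGo_eq, if_neg hcond, pvChunks_eq, pvADrop, if_neg ?_, ← pvChunks_eq, pvJoin_chunks]
    rwa [pvStartswith_part cs pvHdr1 (by decide), pvStartswith_part cs pvHdr2 (by decide)]

-- ===== VERDICT (by name: the statement is the Claim_ definition above) =====
theorem strip_copyright_header_spec : Claim_equal_strip_copyright_header := by
  intro source _
  unfold Spec_strip_copyright_header strip_copyright_header strip_copyright_header_alt
  rw [pvSplitOn_eq_chunks, pvMain]
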